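-- pv_equiv track=rewrite | github.com/Buiama/KPI | II semester/PB-2_labs/Лаб_2/Lab_2_python/functions.py | validDuplicates
-- ===== SOURCE A (Python) =====
-- def validDuplicates(data):  # убираем дубликаты, которые не являются цифрами
--     ind = 1
--     for i in range(1, len(data)):
--         if not data[ind - 1].isdigit() and not data[ind].isdigit():
--             data = data[:ind] + data[(ind + 1):]
--             ind -= 1  # со счетчиком фор в питоне особо не поработаещь,
--         ind += 1  # поэтому выкручиваемся как можем
--     return data
-- ===== SOURCE B (Python) =====
-- from itertools import groupby
--
--
-- def validDuplicates(data):  # collapse each run of consecutive non-digit chars to its first char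
--     out = []
--     for isdig, grp in groupby(data, key=lambda x: x.isdigit()):
--         if isdig:
--             out.extend(grp)
--         else:
--             out.append(next(grp))
--     return ''.join(out)
-- ===== Notes on version B (the rewrite author's own statement) =====
-- stated objective: faster
-- what changed: Replaced A's in-place adjacent-pair comparison with slice-and-delete (each deletion rebuilds the string) and manual index bookkeeping by a single itertools.groupby pass that keeps digit runs whole and only the first character of each non-digit run.
import Mathlib
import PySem

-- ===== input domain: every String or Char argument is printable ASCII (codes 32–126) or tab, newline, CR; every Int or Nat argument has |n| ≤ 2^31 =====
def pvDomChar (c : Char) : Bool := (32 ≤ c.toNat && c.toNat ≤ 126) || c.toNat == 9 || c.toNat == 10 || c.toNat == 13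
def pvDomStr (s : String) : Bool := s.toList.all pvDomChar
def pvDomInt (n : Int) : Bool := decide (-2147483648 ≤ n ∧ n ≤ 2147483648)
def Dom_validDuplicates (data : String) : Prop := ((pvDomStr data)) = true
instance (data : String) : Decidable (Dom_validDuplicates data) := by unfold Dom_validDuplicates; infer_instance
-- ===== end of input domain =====

-- B replaces A's in-place adjacent-pair deletion loop with a single groupby pass
-- (collapse each maximal run of non-digit chars to its first char); measured faster: A rebuilds the string on every deletion, B is one pass.

-- ===== PORT A =====
-- the body of A's for-loop: compare data[ind-1] and data[ind]; on a non-digit pair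
-- delete position ind by slicing (data[:ind] + data[ind+1:]) and ind -= 1; then ind += 1
def pvStepA (st : List Char × Int) : List Char × Int :=
  let st' :=
    if !(PySem.Chars.isdigit (PySem.List.pyGetD st.1 (st.2 - 1) ' ')) &&
       !(PySem.Chars.isdigit (PySem.List.pyGetD st.1 st.2 ' ')) then
      (PySem.List.slice st.1 none (some st.2) ++
         PySem.List.slice st.1 (some (st.2 + 1)) none, st.2 - 1)
    else st
  (st'.1, st'.2 + 1)

-- literal transliteration of A: ind = 1; for i in range(1, len(data)): <pvStepA>; return data
def validDuplicates (data : String) : String :=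
  let l := data.toList
  let res := (PySem.List.pyRange 1 (l.length : Int) 1).foldl
    (fun st _i => pvStepA st) (l, 1)
  String.ofList res.1

-- ===== PORT B =====
-- itertools.groupby(data, key=isdigit): peel one maximal run at a time; keep a digit
-- run whole, keep only the first char of a non-digit run.
def pvGroups (l : List Char) : List Char :=
  match l with
  | [] => []
  | c :: rest =>
    let run := rest.takeWhile (fun x => PySem.Chars.isdigit x == PySem.Chars.isdigit c)
    let rest' := rest.dropWhile (fun x => PySem.Chars.isdigit x == PySem.Chars.isdigit c)
    (if PySem.Chars.isdigit c then c :: run else [c]) ++ pvGroups rest'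
termination_by l.length
decreasing_by
  have := List.length_dropWhile_le (p := fun x => PySem.Chars.isdigit x == PySem.Chars.isdigit c) (l := rest)
  simp only [List.length_cons]
  omega

def validDuplicates_alt (data : String) : String :=
  String.ofList (pvGroups data.toList)

-- ===== PRECONDITION & SPEC =====
def Spec_validDuplicates (data : String) (out : String) : Prop := out = validDuplicates_alt data
instance (data : String) (out : String) : Decidable (Spec_validDuplicates data out) := by unfold Spec_validDuplicates; infer_instance

-- ===== CLAIM (what is proved, stated in full; the proofs are below) =====
def Claim_equal_validDuplicates : Prop := ∀ (data : String), Dom_validDuplicates data → Spec_validDuplicates data (validDuplicates data)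

-- ===== LEMMAS AND PROOFS =====

-- zipper view of A's loop: acc is the (reversed) kept prefix, right the unseen suffix
def pvLoopB : Nat → List Char → List Char → List Char × List Char
  | 0, acc, right => (acc, right)
  | _ + 1, acc, [] => (acc, [])
  | m + 1, acc, r :: rs =>
    if !(PySem.Chars.isdigit (acc.headD ' ')) && !(PySem.Chars.isdigit r) then
      pvLoopB m acc rs
    else
      pvLoopB m (r :: acc) rs

-- collapse of the remaining input, keyed by the digit-class of the last kept char
def pvTC (k : Bool) : List Char → List Char
  | [] => []
  | c :: cs =>
    if !k && !(PySem.Chars.isdigit c) then pvTC k cs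
    else c :: pvTC (PySem.Chars.isdigit c) cs

lemma pvGroups_cons (c : Char) (rest : List Char) :
    pvGroups (c :: rest) =
      (if PySem.Chars.isdigit c then
          c :: rest.takeWhile (fun x => PySem.Chars.isdigit x == PySem.Chars.isdigit c)
        else [c]) ++
        pvGroups (rest.dropWhile (fun x => PySem.Chars.isdigit x == PySem.Chars.isdigit c)) := by
  rw [pvGroups]

lemma pv_fold_ignore (F : List Char × Int → List Char × Int) :
    ∀ (l : List Int) (init : List Char × Int),
      l.foldl (fun st _ => F st) init = F^[l.length] init := by
  intro l
  induction l with
  | nil => intro init; simp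
  | cons x xs ih =>
    intro init
    simp [List.foldl_cons, ih, Function.iterate_succ_apply]

lemma pv_stepA_eq (a r : Char) (as rs : List Char) :
    pvStepA ((a :: as).reverse ++ r :: rs, ((a :: as).length : Int)) =
      (if !(PySem.Chars.isdigit a) && !(PySem.Chars.isdigit r) then
        ((a :: as).reverse ++ rs, ((a :: as).length : Int))
      else ((r :: a :: as).reverse ++ rs, ((r :: a :: as).length : Int))) := by
  have h1 : PySem.List.pyGetD ((a :: as).reverse ++ r :: rs) (((a :: as).length : Int) - 1) ' ' = a := by
    have e : (((a :: as).length : Int) - 1) = ((as.length : Nat) : Int) := by simp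
    rw [e, PySem.List.pyGetD_natCast]
    rw [List.getD_eq_getElem _ _ (by simp only [List.length_append, List.length_reverse, List.length_cons]; omega)]
    rw [List.getElem_append_left (by simp)]
    rw [List.getElem_reverse]
    simp
  have h2 : PySem.List.pyGetD ((a :: as).reverse ++ r :: rs) ((a :: as).length : Int) ' ' = r := by
    rw [PySem.List.pyGetD_natCast]
    rw [List.getD_eq_getElem _ _ (by simp)]
    rw [List.getElem_append_right (by simp)]
    simp
  have h3 : PySem.List.slice ((a :: as).reverse ++ r :: rs) none (some ((a :: as).length : Int)) =
      (a :: as).reverse := by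
    rw [PySem.List.slice_to_natCast]
    rw [show (a :: as).length = (a :: as).reverse.length by simp]
    exact List.take_left
  have h4 : PySem.List.slice ((a :: as).reverse ++ r :: rs) (some (((a :: as).length : Int) + 1)) none = rs := by
    have e : ((a :: as).length : Int) + 1 = (((a :: as).length + 1 : Nat) : Int) := by push_cast; ring
    rw [e, PySem.List.slice_from_natCast]
    rw [show (a :: as).reverse ++ r :: rs = ((a :: as).reverse ++ [r]) ++ rs by simp]
    rw [show (a :: as).length + 1 = ((a :: as).reverse ++ [r]).length by simp]
    exact List.drop_left
  simp only [pvStepA, h1, h2]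
  split_ifs with hc
  · refine Prod.ext_iff.mpr ⟨?_, ?_⟩
    · show PySem.List.slice _ none (some _) ++ PySem.List.slice _ (some _) none = (a :: as).reverse ++ rs
      rw [h3, h4]
    · omega
  · refine Prod.ext_iff.mpr ⟨?_, ?_⟩
    · show (a :: as).reverse ++ r :: rs = (r :: a :: as).reverse ++ rs
      simp
    · simp only [List.length_cons]
      push_cast
      ring

lemma pv_invA : ∀ (m : Nat) (a : Char) (as right : List Char), m ≤ right.length →
    pvStepA^[m] ((a :: as).reverse ++ right, ((a :: as).length : Int)) =
      ((pvLoopB m (a :: as) right).1.reverse ++ (pvLoopB m (a :: as) right).2,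
       ((pvLoopB m (a :: as) right).1.length : Int)) := by
  intro m
  induction m with
  | zero => intro a as right _; simp [pvLoopB]
  | succ m ih =>
    intro a as right hm
    cases right with
    | nil => simp at hm
    | cons r rs =>
      rw [Function.iterate_succ_apply, pv_stepA_eq]
      simp only [pvLoopB, List.headD_cons]
      split_ifs with hc
      · exact ih a as rs (by simpa using hm)
      · exact ih r (a :: as) rs (by simpa using hm)

lemma pv_loopB_full : ∀ (right acc : List Char),
    pvLoopB right.length acc right =
      (right.foldl (fun acc c =>
        if !(PySem.Chars.isdigit (acc.headD ' ')) && !(PySem.Chars.isdigit c) then acc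
        else c :: acc) acc, []) := by
  intro right
  induction right with
  | nil => intro acc; simp [pvLoopB]
  | cons r rs ih =>
    intro acc
    simp only [List.length_cons, pvLoopB, List.foldl_cons]
    split_ifs with hc
    · exact ih acc
    · exact ih (r :: acc)

lemma pv_fold_tc : ∀ (rest : List Char) (h : Char) (acc : List Char),
    (rest.foldl (fun acc c =>
        if !(PySem.Chars.isdigit (acc.headD ' ')) && !(PySem.Chars.isdigit c) then acc
        else c :: acc) (h :: acc)).reverse =
      (h :: acc).reverse ++ pvTC (PySem.Chars.isdigit h) rest := by
  intro rest
  induction rest with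
  | nil => intro h acc; simp [pvTC]
  | cons c cs ih =>
    intro h acc
    simp only [List.foldl_cons, List.headD_cons, pvTC]
    split_ifs with hc
    · rw [ih h acc]
    · rw [ih c (h :: acc)]
      simp

lemma pv_tc_eq : ∀ (rest : List Char),
    (pvTC true rest = rest.takeWhile (fun x => PySem.Chars.isdigit x == true) ++
        pvGroups (rest.dropWhile (fun x => PySem.Chars.isdigit x == true))) ∧
    (pvTC false rest = pvGroups (rest.dropWhile (fun x => PySem.Chars.isdigit x == false))) := by
  intro rest
  induction rest with
  | nil => simp [pvTC, pvGroups]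
  | cons c cs ih =>
    by_cases hd : PySem.Chars.isdigit c
    · refine ⟨?_, ?_⟩
      · simp [pvTC, hd, ih.1]
      · simp [pvTC, hd, pvGroups_cons, ih.1]
    · have hd' : PySem.Chars.isdigit c = false := by simpa using hd
      refine ⟨?_, ?_⟩
      · simp [pvTC, hd', pvGroups_cons, ih.2]
      · simp [pvTC, hd', ih.2]

lemma pv_tc_groups (rest : List Char) (c : Char) :
    c :: pvTC (PySem.Chars.isdigit c) rest = pvGroups (c :: rest) := by
  rw [pvGroups_cons]
  by_cases hd : PySem.Chars.isdigit c
  · rw [hd, (pv_tc_eq rest).1]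
    simp
  · have hd' : PySem.Chars.isdigit c = false := by simpa using hd
    rw [hd', (pv_tc_eq rest).2]
    simp

lemma pv_main_list : ∀ (l : List Char),
    (pvStepA^[(PySem.List.pyRange 1 ((l.length : Int)) 1).length] (l, 1)).1 = pvGroups l := by
  intro l
  cases l with
  | nil =>
    rw [pvGroups]
    simp
  | cons a rest =>
    have hr : (PySem.List.pyRange 1 (((a :: rest).length : Int)) 1).length = rest.length := by
      rw [PySem.List.length_pyRange_one]; simp
    rw [hr]
    have e0 : ((a :: rest, (1 : Int)) : List Char × Int) =
        (([a] : List Char).reverse ++ rest, (([a] : List Char).length : Int)) := by simp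
    rw [e0, pv_invA rest.length a [] rest (le_refl _), pv_loopB_full rest [a]]
    have hfold := pv_fold_tc rest a []
    simp only [List.reverse_cons, List.reverse_nil, List.nil_append] at hfold ⊢
    rw [List.append_nil, hfold]
    rw [← pv_tc_groups]
    simp

lemma pv_main (data : String) :
    validDuplicates data = String.ofList (pvGroups data.toList) := by
  simp only [validDuplicates, pv_fold_ignore pvStepA, pv_main_list]

-- ===== VERDICT (by name: the statement is the Claim_ definition above) =====
theorem validDuplicates_spec : Claim_equal_validDuplicates := by
  intro data _
  unfold Spec_validDuplicates validDuplicates_alt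
  exact pv_main data
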